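-- pv_equiv track=rewrite | github.com/0xB111B/Pyramid | pyramid.py | is_pyramid
-- ===== SOURCE A (Python) =====
-- def is_pyramid(word):
--     if len(word) == 0:
--         return False
--
--     if not word.isalpha():
--         return False
--
--     count = [0] * (ord('z') - ord('a') + 1)
--
--     for i in range(0, len(word)):
--         count[ord(word[i]) - ord('a')] += 1
--     count.sort()
--
--     for i in range(0, len(count)):
--         if count[i] == 0:
--             continue
--         if i > 0 and count[i] != count[i - 1] + 1:
--             return False
--
--     return True
-- ===== SOURCE B (Python) =====
-- def is_pyramid(word):
--     if len(word) == 0 or not word.isalpha():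
--         return False
--
--     count = [0] * (ord('z') - ord('a') + 1)
--     for ch in word:
--         count[ord(ch) - ord('a')] += 1
--
--     nonzero = [c for c in count if c]
--     return (len(set(nonzero)) == len(nonzero)
--             and min(nonzero) == 1
--             and max(nonzero) == len(nonzero))
-- ===== Notes on version B (the rewrite author's own statement) =====
-- stated objective: simpler
-- what changed: Replaces A's sort-then-adjacency scan of the 26 counts by a direct characterisation of the nonzero counts: pairwise distinct, minimum 1, maximum equal to their number.
-- intended difference: On alphabetic words using all 26 letters whose letter counts are 26 distinct consecutive values starting at 2 or more, A returns True (its sorted scan never checks the first count against anything when no count is zero), while B returns False because the smallest count is not 1, which is what a pyramid 1,2,3,... requires. — e.g. on is_pyramid("aabbbccccdddddeeeeeefffffffgggggggghhhhhhhhhiiiiiiiiiijjjjjjjjjjjkkkkkkkkkkkklllllllllllllmmmmmmmmmmmmmmnnnnnnnnnnnnnn…): A returns true, B returns false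
-- outside the precondition, e.g. on is_pyramid('A'): A raises IndexError, B raises IndexError; on is_pyramid('F'): A raises IndexError, B raises IndexError
import Mathlib
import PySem

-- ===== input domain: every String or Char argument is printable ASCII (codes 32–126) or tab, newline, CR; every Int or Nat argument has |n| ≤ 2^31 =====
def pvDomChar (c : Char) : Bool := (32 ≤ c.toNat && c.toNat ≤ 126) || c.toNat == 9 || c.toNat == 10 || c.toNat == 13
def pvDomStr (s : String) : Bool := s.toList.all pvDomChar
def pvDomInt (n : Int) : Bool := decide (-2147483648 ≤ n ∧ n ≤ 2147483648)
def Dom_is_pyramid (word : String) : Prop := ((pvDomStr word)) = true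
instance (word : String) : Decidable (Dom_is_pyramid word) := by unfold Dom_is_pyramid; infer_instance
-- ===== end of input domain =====

-- B replaces A's sort-then-adjacency scan by a direct characterisation of the nonzero
-- counts (distinct, minimum 1, maximum = their number); on the all-26-letters corner
-- described at D_ below, B's value differs from A's (objective: simpler).

-- ===== PORT A =====
-- count[i] += 1 for an Int index; outside 0 ≤ i < len the Python raises IndexError (excluded by Pre_)
def pvIncAt : List Int → Int → List Int
  | [], _ => []
  | x :: xs, i => if i = 0 then (x + 1) :: xs else x :: pvIncAt xs (i - 1)

-- the counting loop shared verbatim by both Pythons: count = [0]*26; for ch: count[ord(ch)-97] += 1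
-- a negative index ≥ -26 wraps to the end of the length-26 list, exactly as in Python;
-- an index < -26 raises IndexError in Python (those inputs are excluded by Pre_)
def pvCount (word : List Char) : List Int :=
  word.foldl
    (fun cnt c =>
      pvIncAt cnt
        (if (c.toNat : Int) - 97 < 0 then (c.toNat : Int) - 97 + 26 else (c.toNat : Int) - 97))
    (List.replicate 26 (0 : Int))

-- A's second loop: prev carries count[i-1]; zeros are skipped, a nonzero must be prev + 1
def pvScanA : Int → List Int → Bool
  | _, [] => true
  | prev, x :: xs => if x = 0 then pvScanA x xs
      else if x ≠ prev + 1 then false else pvScanA x xs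

def is_pyramid (word : String) : Bool :=
  if word.toList.length = 0 then false
  else if !(PySem.Str.strIsalpha word) then false
  else
    match PySem.List.sorted (pvCount word.toList) (fun x => x) false with
    | [] => true                 -- i = 0 of A's loop never checks anything
    | x :: xs => pvScanA x xs

-- ===== PORT B =====
-- min(nonzero)/max(nonzero): nonzero is nonempty whenever the guards pass inside Pre_, so .getD 0 is never taken there
def is_pyramid_alt (word : String) : Bool :=
  if word.toList.length = 0 || !(PySem.Str.strIsalpha word) then false
  else
    let nonzero := (pvCount word.toList).filter (fun c => decide (c ≠ 0))
    decide ((PySem.Set.ofList nonzero).length = nonzero.length)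
      && decide ((PySem.List.min? nonzero (fun x => x)).getD 0 = 1)
      && decide ((PySem.List.max? nonzero (fun x => x)).getD 0 = (nonzero.length : Int))

-- ===== PRECONDITION & SPEC =====
-- Both Pythons raise IndexError (count[ord(ch)-97] with ord(ch)-97 < -26) on an alphabetic word
-- containing one of the letters 'A'..'F'; Pre_ excludes exactly those inputs (A returns on everything else in Dom).
def Pre_is_pyramid (word : String) : Prop :=
  PySem.Str.strIsalpha word = true →
    word.toList.all (fun c => decide (71 ≤ c.toNat) && decide (c.toNat ≤ 122)) = true

instance (word : String) : Decidable (Pre_is_pyramid word) := by unfold Pre_is_pyramid; infer_instance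

def pvWitness_is_pyramid : String := "abbccc"

-- the 26 letter counts of the word, read directly off the input (code 97+i is the letter,
-- code 71+i the uppercase/wrapped character landing in the same slot of the counting loop)
def pvCnts (word : String) : List Int :=
  (List.range 26).map
    (fun i => (word.toList.countP (fun c => c.toNat == 97 + i || c.toNat == 71 + i) : Int))

-- On alphabetic words using all 26 letters whose letter counts are 26 distinct consecutive values
-- starting at 2 or more, A returns True (its sorted scan never checks the first count against anything
-- when no count is zero), while B returns False because the smallest count is not 1, which is what a
-- pyramid 1,2,3,... requires.
def D_is_pyramid (word : String) : Prop :=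
  word.toList ≠ [] ∧ PySem.Str.strIsalpha word = true ∧
  (pvCnts word).Nodup ∧ (∀ c ∈ pvCnts word, 2 ≤ c) ∧
  (∀ c ∈ pvCnts word, ∀ c' ∈ pvCnts word, c - c' ≤ 25)

instance (word : String) : Decidable (D_is_pyramid word) := by unfold D_is_pyramid; infer_instance

def Spec_is_pyramid (word : String) (out : Bool) : Prop := ¬ D_is_pyramid word → out = is_pyramid_alt word
instance (word : String) (out : Bool) : Decidable (Spec_is_pyramid word out) := by unfold Spec_is_pyramid; infer_instance

def pvDiffWitness_is_pyramid : String := "aabbbccccdddddeeeeeefffffffgggggggghhhhhhhhhiiiiiiiiiijjjjjjjjjjjkkkkkkkkkkkklllllllllllllmmmmmmmmmmmmmmnnnnnnnnnnnnnnnoooooooooooooooopppppppppppppppppqqqqqqqqqqqqqqqqqqrrrrrrrrrrrrrrrrrrrsssssssssssssssssssstttttttttttttttttttttuuuuuuuuuuuuuuuuuuuuuuvvvvvvvvvvvvvvvvvvvvvvvwwwwwwwwwwwwwwwwwwwwwwwwxxxxxxxxxxxxxxxxxxxxxxxxxyyyyyyyyyyyyyyyyyyyyyyyyyyzzzzzz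zzzzzzzzzzzzzzzzzzzzz"

def pvDiffWitnessOut_is_pyramid : Bool × Bool := (true, false)

-- ===== CLAIM (what is proved, stated in full; the proofs are below) =====
def Claim_unchanged_is_pyramid : Prop := ∀ (word : String), Dom_is_pyramid word → Pre_is_pyramid word → Spec_is_pyramid word (is_pyramid word)
def Claim_changed_is_pyramid : Prop := Dom_is_pyramid (pvDiffWitness_is_pyramid) ∧ Pre_is_pyramid (pvDiffWitness_is_pyramid) ∧ D_is_pyramid (pvDiffWitness_is_pyramid) ∧ is_pyramid (pvDiffWitness_is_pyramid) = pvDiffWitnessOut_is_pyramid.1 ∧ is_pyramid_alt (pvDiffWitness_is_pyramid) = pvDiffWitnessOut_is_pyramid.2 ∧ pvDiffWitnessOut_is_pyramid.1 ≠ pvDiffWitnessOut_is_pyramid.2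
def Claim_exact_is_pyramid : Prop := ∀ (word : String), Dom_is_pyramid word → Pre_is_pyramid word → D_is_pyramid word → is_pyramid word ≠ is_pyramid_alt word


-- ===== LEMMAS AND PROOFS =====

-- t is the consecutive run m, m+1, m+2, …
def isRun : Int → List Int → Bool
  | _, [] => true
  | m, x :: xs => x = m && isRun (m + 1) xs

theorem length_pvIncAt (l : List Int) (i : Int) : (pvIncAt l i).length = l.length := by
  induction l generalizing i with
  | nil => rfl
  | cons x xs ih => simp only [pvIncAt]; split <;> simp [ih]

theorem nonneg_pvIncAt (l : List Int) (i : Int) (h : ∀ x ∈ l, 0 ≤ x) :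
    ∀ x ∈ pvIncAt l i, 0 ≤ x := by
  induction l generalizing i with
  | nil => simp [pvIncAt]
  | cons x xs ih =>
      simp only [pvIncAt]
      split
      · intro y hy
        rcases List.mem_cons.1 hy with rfl | hy
        · have := h x (List.mem_cons_self ..); omega
        · exact h y (List.mem_cons_of_mem _ hy)
      · intro y hy
        rcases List.mem_cons.1 hy with rfl | hy
        · exact h y (List.mem_cons_self ..)
        · exact ih (i - 1) (fun z hz => h z (List.mem_cons_of_mem _ hz)) y hy

theorem sum_pvIncAt (l : List Int) (i : Int) (h0 : 0 ≤ i) (h1 : i < l.length) :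
    (pvIncAt l i).sum = l.sum + 1 := by
  induction l generalizing i with
  | nil => simp at h1; omega
  | cons x xs ih =>
      simp only [pvIncAt]
      split
      · simp only [List.sum_cons]; ring
      · have h0' : (0 : Int) ≤ i - 1 := by omega
        have hlt : i - 1 < xs.length := by simp at h1; omega
        simp only [List.sum_cons, ih (i - 1) h0' hlt]; ring

theorem pvCount_inv (w : List Char) (hw : ∀ c ∈ w, 71 ≤ c.toNat ∧ c.toNat ≤ 122) :
    (pvCount w).length = 26 ∧ (∀ x ∈ pvCount w, 0 ≤ x) ∧ (pvCount w).sum = w.length := by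
  unfold pvCount
  induction w using List.reverseRecOn with
  | nil => simp
  | append_singleton w c ih =>
      have hw' : ∀ c ∈ w, 71 ≤ c.toNat ∧ c.toNat ≤ 122 :=
        fun c hc => hw c (List.mem_append_left _ hc)
      have hc := hw c (List.mem_append_right _ (List.mem_singleton_self c))
      obtain ⟨hl, hn, hs⟩ := ih hw'
      simp only [List.foldl_append, List.foldl_cons, List.foldl_nil]
      refine ⟨by rw [length_pvIncAt]; exact hl, nonneg_pvIncAt _ _ hn, ?_⟩
      rw [sum_pvIncAt _ _ (by split <;> omega) (by rw [hl]; split <;> omega), hs]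
      simp

theorem getD_pvIncAt (l : List Int) (k : Int) (j : Nat) (h0 : 0 ≤ k) (h1 : k < (l.length : Int)) :
    (pvIncAt l k).getD j 0 = if (j : Int) = k then l.getD j 0 + 1 else l.getD j 0 := by
  induction l generalizing k j with
  | nil => simp at h1; omega
  | cons x xs ih =>
      by_cases hk : k = 0
      · subst hk
        have hred : pvIncAt (x :: xs) 0 = (x + 1) :: xs := by simp [pvIncAt]
        rw [hred]
        cases j with
        | zero => simp
        | succ j' =>
            simp only [List.getD_cons_succ]
            rw [if_neg (by push_cast; omega)]
      · have hred : pvIncAt (x :: xs) k = x :: pvIncAt xs (k - 1) := by simp [pvIncAt, hk]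
        rw [hred]
        cases j with
        | zero =>
            simp only [List.getD_cons_zero]
            rw [if_neg (by push_cast; omega)]
        | succ j' =>
            simp only [List.getD_cons_succ]
            rw [ih (k - 1) j' (by omega) (by simp at h1 ⊢; omega)]
            by_cases hj : (j' : Int) = k - 1
            · rw [if_pos hj, if_pos (by push_cast; omega)]
            · rw [if_neg hj, if_neg (by push_cast; omega)]

theorem countLoop (w : List Char) (acc : List Int) (hlen : acc.length = 26)
    (hw : ∀ c ∈ w, 71 ≤ c.toNat ∧ c.toNat ≤ 122) (j : Nat) (hj : j < 26) :
    (w.foldl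
      (fun cnt c => pvIncAt cnt
        (if (c.toNat : Int) - 97 < 0 then (c.toNat : Int) - 97 + 26 else (c.toNat : Int) - 97))
      acc).getD j 0
    = acc.getD j 0 + (w.countP (fun c => c.toNat == 97 + j || c.toNat == 71 + j) : Int) := by
  induction w generalizing acc with
  | nil => simp
  | cons c w' ih =>
      have hc := hw c (List.mem_cons_self ..)
      have hw' : ∀ d ∈ w', 71 ≤ d.toNat ∧ d.toNat ≤ 122 :=
        fun d hd => hw d (List.mem_cons_of_mem _ hd)
      simp only [List.foldl_cons]
      set k : Int := if (c.toNat : Int) - 97 < 0 then (c.toNat : Int) - 97 + 26 else (c.toNat : Int) - 97 with hkdef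
      have hk0 : 0 ≤ k := by rw [hkdef]; split <;> omega
      have hk1 : k < ((pvIncAt acc k).length : Int) := by
        rw [length_pvIncAt, hlen, hkdef]; split <;> omega
      rw [ih (pvIncAt acc k) (by rw [length_pvIncAt]; exact hlen) hw',
        getD_pvIncAt acc k j hk0 (by rw [hlen]; rw [length_pvIncAt, hlen] at hk1; exact hk1),
        List.countP_cons]
      by_cases hcj : c.toNat = 97 + j ∨ c.toNat = 71 + j
      · have hb : (c.toNat == 97 + j || c.toNat == 71 + j) = true := by simpa using hcj
        have hjk : (j : Int) = k := by rw [hkdef]; split <;> omega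
        rw [if_pos hjk, hb]
        simp only [if_pos trivial]
        push_cast
        ring
      · have hb : (c.toNat == 97 + j || c.toNat == 71 + j) = false := by
          simp only [Bool.or_eq_false_iff, beq_eq_false_iff_ne, ne_eq]
          exact ⟨fun h => hcj (Or.inl h), fun h => hcj (Or.inr h)⟩
        have hjk : ¬ (j : Int) = k := by rw [hkdef]; split <;> omega
        rw [if_neg hjk, hb]
        simp

theorem pvCount_eq_cnts (word : String)
    (hw : ∀ c ∈ word.toList, 71 ≤ c.toNat ∧ c.toNat ≤ 122) :
    pvCount word.toList = pvCnts word := by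
  have hlen : (pvCount word.toList).length = 26 := (pvCount_inv word.toList hw).1
  apply List.ext_getElem
  · rw [hlen]; simp [pvCnts]
  · intro j h1 h2
    have hj : j < 26 := by rw [hlen] at h1; exact h1
    have hloop := countLoop word.toList (List.replicate 26 (0 : Int)) (by simp) hw j hj
    have hz : (List.replicate 26 (0 : Int)).getD j 0 = 0 := by
      rw [List.getD_eq_getElem _ _ (by simpa using hj), List.getElem_replicate]
    rw [← List.getD_eq_getElem (pvCount word.toList) 0 h1, ← List.getD_eq_getElem (pvCnts word) 0 h2]
    show (pvCount word.toList).getD j 0 = (pvCnts word).getD j 0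
    have hR : (pvCnts word).getD j 0
        = (word.toList.countP (fun c => c.toNat == 97 + j || c.toNat == 71 + j) : Int) := by
      rw [List.getD_eq_getElem _ _ (by simp [pvCnts]; exact hj)]
      simp [pvCnts]
    rw [hR]
    unfold pvCount
    rw [hloop, hz]
    ring

-- Set.ofList length counts the distinct elements
theorem len_foldl_add_le (xs s : List Int) :
    (List.foldl PySem.Set.add s xs).length ≤ s.length + xs.length := by
  induction xs generalizing s with
  | nil => simp
  | cons x t ih =>
      simp only [List.foldl_cons]
      have h1 : (PySem.Set.add s x).length ≤ s.length + 1 := by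
        simp only [PySem.Set.add]; split <;> simp
      have h2 := ih (PySem.Set.add s x)
      simp only [List.length_cons]; omega

theorem len_foldl_add_lt (xs s : List Int) (hs : s.Nodup) (h : ¬ (s ++ xs).Nodup) :
    (List.foldl PySem.Set.add s xs).length < s.length + xs.length := by
  induction xs generalizing s with
  | nil => exact absurd hs (by simpa using h)
  | cons x t ih =>
      simp only [List.foldl_cons]
      by_cases hx : x ∈ s
      · have hadd : PySem.Set.add s x = s := by
          simp [PySem.Set.add, PySem.Set.contains, hx]
        rw [hadd]
        have := len_foldl_add_le t s
        simp only [List.length_cons]; omega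
      · have hadd : PySem.Set.add s x = s ++ [x] := by
          simp [PySem.Set.add, PySem.Set.contains, hx]
        rw [hadd]
        have hs' : (s ++ [x]).Nodup := by
          simp [List.nodup_append, hs]
          rintro a ha rfl
          exact hx ha
        have h' : ¬ ((s ++ [x]) ++ t).Nodup := by
          simpa [List.append_assoc] using h
        have := ih (s ++ [x]) hs' h'
        simp only [List.length_append, List.length_cons, List.length_nil] at this ⊢
        omega

theorem foldl_add_of_nodup (xs s : List Int) (h : (s ++ xs).Nodup) :
    List.foldl PySem.Set.add s xs = s ++ xs := by
  induction xs generalizing s with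
  | nil => simp
  | cons x t ih =>
      simp only [List.foldl_cons]
      have hx : x ∉ s := by
        intro hx
        have := List.disjoint_of_nodup_append h
        exact this hx (List.mem_cons_self ..)
      have hadd : PySem.Set.add s x = s ++ [x] := by
        simp [PySem.Set.add, PySem.Set.contains, hx]
      rw [hadd, ih (s ++ [x]) (by simpa [List.append_assoc] using h)]
      simp

theorem ofList_len_eq_iff (xs : List Int) :
    (PySem.Set.ofList xs).length = xs.length ↔ xs.Nodup := by
  constructor
  · intro h
    by_contra hn
    have := len_foldl_add_lt xs [] (by simp) (by simpa using hn)
    rw [PySem.Set.ofList_eq_foldl] at h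
    simp at this; omega
  · intro h
    rw [PySem.Set.ofList_eq_foldl, foldl_add_of_nodup xs [] (by simpa using h)]
    simp

-- A's scan on a zero-free tail is the consecutive-run test
theorem pvScanA_no_zero (t : List Int) (p : Int) (h : ∀ x ∈ t, x ≠ 0) :
    pvScanA p t = isRun (p + 1) t := by
  induction t generalizing p with
  | nil => rfl
  | cons x xs ih =>
      have hx : x ≠ 0 := h x (List.mem_cons_self ..)
      have h' : ∀ y ∈ xs, y ≠ 0 := fun y hy => h y (List.mem_cons_of_mem _ hy)
      simp only [pvScanA, isRun, hx]
      by_cases he : x = p + 1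
      · subst he; simp [ih _ h']
      · simp [he]

-- A's scan from prev = 0 over a sorted nonnegative list tests the run 1,2,… on its nonzero part
theorem pvScanA_zero (u : List Int) (hp : u.Pairwise (· ≤ ·)) (hn : ∀ x ∈ u, 0 ≤ x) :
    pvScanA 0 u = isRun 1 (u.filter (fun c => decide (c ≠ 0))) := by
  induction u with
  | nil => rfl
  | cons x xs ih =>
      by_cases hx : x = 0
      · subst hx
        simp only [pvScanA]
        rw [if_pos trivial, ih hp.of_cons (fun y hy => hn y (List.mem_cons_of_mem _ hy))]
        have hf : List.filter (fun c => decide (c ≠ 0)) ((0:Int) :: xs)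
            = List.filter (fun c => decide (c ≠ 0)) xs := by simp
        rw [hf]
      · have hpos : (0:Int) < x := lt_of_le_of_ne (hn x (List.mem_cons_self ..)) (Ne.symm hx)
        have hxs : ∀ y ∈ xs, y ≠ 0 := by
          intro y hy
          have := List.rel_of_pairwise_cons hp hy
          omega
        have hfilter : xs.filter (fun c => decide (c ≠ 0)) = xs :=
          List.filter_eq_self.2 (fun y hy => by simpa using hxs y hy)
        have hconsf : List.filter (fun c => decide (c ≠ 0)) (x :: xs) = x :: xs := by
          rw [List.filter_cons, if_pos (by simpa using hx), hfilter]
        simp only [pvScanA]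
        rw [if_neg hx, hconsf]
        by_cases he : x = 1
        · subst he
          rw [if_neg (by omega), pvScanA_no_zero xs 1 hxs]
          simp [isRun]
        · rw [if_pos (by omega)]
          simp [isRun, he]

-- in a strictly increasing list the last element is at least head + (length - 1)
theorem last_ge_of_pairwise_lt (xs : List Int) (x g : Int)
    (hp : (x :: xs).Pairwise (· < ·)) (hg : (x :: xs).getLast? = some g) :
    x + xs.length ≤ g := by
  induction xs generalizing x with
  | nil => simp at hg ⊢; omega
  | cons y ys ih =>
      have hxy : x < y := List.rel_of_pairwise_cons hp (List.mem_cons_self ..)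
      have hg' : (y :: ys).getLast? = some g := by
        simpa [List.getLast?_cons_cons] using hg
      have := ih y hp.of_cons hg'
      simp only [List.length_cons]
      push_cast
      omega

-- in a sorted list every element is at most the last
theorem le_last_of_pairwise_le (xs : List Int) (g : Int)
    (hp : xs.Pairwise (· ≤ ·)) (hg : xs.getLast? = some g) :
    ∀ y ∈ xs, y ≤ g := by
  induction xs with
  | nil => simp
  | cons x t ih =>
      intro y hy
      rcases t.eq_nil_or_concat with rfl | _
      · simp at hg hy; omega
      · have hg' : t.getLast? = some g := by
          rcases t with _ | ⟨z, zs⟩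
          · simp_all
          · simpa [List.getLast?_cons_cons] using hg
        rcases List.mem_cons.1 hy with rfl | hy
        · have hz : g ∈ t := List.mem_of_getLast? hg'
          exact List.rel_of_pairwise_cons hp hz
        · exact ih hp.of_cons hg' y hy

-- the crux: A's run test ⟺ distinctness + last-element value, on a sorted list
theorem isRun_iff (xs : List Int) (x : Int) (hp : (x :: xs).Pairwise (· ≤ ·)) :
    isRun (x + 1) xs = true ↔
      ((x :: xs).Nodup ∧ (x :: xs).getLast? = some (x + xs.length)) := by
  induction xs generalizing x with
  | nil => simp [isRun]
  | cons y ys ih =>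
      have hyys : ∀ z ∈ ys, y ≤ z := fun z hz => List.rel_of_pairwise_cons hp.of_cons hz
      have hxy : x ≤ y := List.rel_of_pairwise_cons hp (List.mem_cons_self ..)
      simp only [isRun, Bool.and_eq_true, decide_eq_true_eq]
      by_cases he : y = x + 1
      · subst he
        rw [ih (x + 1) hp.of_cons]
        constructor
        · rintro ⟨-, hnd, hlast⟩
          refine ⟨?_, ?_⟩
          · refine List.nodup_cons.2 ⟨?_, hnd⟩
            intro hx
            rcases List.mem_cons.1 hx with h | h
            · omega
            · have := hyys x h; omega
          · rw [List.getLast?_cons_cons]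
            convert hlast using 2
            simp only [List.length_cons]
            push_cast; ring
        · rintro ⟨hnd, hlast⟩
          refine ⟨rfl, (List.nodup_cons.1 hnd).2, ?_⟩
          rw [List.getLast?_cons_cons] at hlast
          convert hlast using 2
          simp only [List.length_cons]
          push_cast; ring
      · constructor
        · rintro ⟨h, -⟩; omega
        · rintro ⟨hnd, hlast⟩
          exfalso
          have hstrict : (x :: y :: ys).Pairwise (· < ·) := by
            have := hp.and hnd
            exact this.imp (fun {a b} ⟨h1, h2⟩ => lt_of_le_of_ne h1 h2)
          have := last_ge_of_pairwise_lt (y :: ys) x (x + (y :: ys).length) hstrict hlast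
          have hxy' : x < y := List.rel_of_pairwise_cons hstrict (List.mem_cons_self ..)
          have hy2 : x + 2 ≤ y := by omega
          have hys := last_ge_of_pairwise_lt ys y (x + (y :: ys).length)
            hstrict.of_cons (by simpa [List.getLast?_cons_cons] using hlast)
          simp only [List.length_cons] at hys
          push_cast at hys
          omega

-- B's min is the head of the sorted nonzero list
theorem min_eq_head (nz t : List Int) (x : Int) (xs : List Int)
    (hperm : t.Perm nz) (ht : t = x :: xs) (hp : t.Pairwise (· ≤ ·)) :
    PySem.List.min? nz (fun x => x) = some x := by
  subst ht
  obtain ⟨m, hm⟩ : ∃ m, PySem.List.min? nz (fun x => x) = some m := by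
    cases h : PySem.List.min? nz (fun x => x) with
    | none =>
        rw [PySem.List.min?_eq_none_iff] at h
        subst h
        exact absurd hperm.symm (by simp)
    | some m => exact ⟨m, rfl⟩
  rw [hm]
  have hmmem : m ∈ nz := PySem.List.min?_mem hm
  have hmin : ∀ y ∈ nz, m ≤ y := fun y hy => PySem.List.min?_isMin hm y hy
  have hxmem : x ∈ nz := hperm.mem_iff.1 (List.mem_cons_self ..)
  have hxmin : ∀ y ∈ nz, x ≤ y := by
    intro y hy
    rcases List.mem_cons.1 (hperm.mem_iff.2 hy) with rfl | hy'
    · omega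
    · exact List.rel_of_pairwise_cons hp hy'
  have := hmin x hxmem
  have := hxmin m hmmem
  congr 1; omega

-- B's max is the last of the sorted nonzero list
theorem max_eq_last (nz t : List Int) (g : Int)
    (hperm : t.Perm nz) (hg : t.getLast? = some g) (hp : t.Pairwise (· ≤ ·)) :
    PySem.List.max? nz (fun x => x) = some g := by
  obtain ⟨M, hM⟩ : ∃ M, PySem.List.max? nz (fun x => x) = some M := by
    cases h : PySem.List.max? nz (fun x => x) with
    | none =>
        rw [PySem.List.max?_eq_none_iff] at h
        subst h
        have : t = [] := List.Perm.eq_nil hperm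
        simp [this] at hg
    | some M => exact ⟨M, rfl⟩
  rw [hM]
  have hMmem : M ∈ nz := PySem.List.max?_mem hM
  have hMmax : ∀ y ∈ nz, y ≤ M := fun y hy => PySem.List.max?_isMax hM y hy
  have hgmem : g ∈ nz := hperm.mem_iff.1 (List.mem_of_getLast? hg)
  have hgmax : ∀ y ∈ nz, y ≤ g := fun y hy =>
    le_last_of_pairwise_le t g hp hg y (hperm.mem_iff.2 hy)
  have := hMmax g hgmem
  have := hgmax M hMmem
  congr 1; omega

-- the whole analysis for a nonempty alphabetic word inside Pre_: on D_ A answers true and B false,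
-- off D_ they agree
theorem main_lemma (word : String)
    (hlen : ¬ word.toList.length = 0)
    (halpha : PySem.Str.strIsalpha word = true)
    (hchars : ∀ c ∈ word.toList, 71 ≤ c.toNat ∧ c.toNat ≤ 122) :
    (D_is_pyramid word → is_pyramid word = true ∧ is_pyramid_alt word = false) ∧
    (¬ D_is_pyramid word → is_pyramid word = is_pyramid_alt word) := by
  obtain ⟨hc26, hcnn, hcsum⟩ := pvCount_inv word.toList hchars
  have hbridge : pvCnts word = pvCount word.toList := (pvCount_eq_cnts word hchars).symm
  have hne : word.toList ≠ [] := by intro h; exact hlen (by simp [h])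
  have hA0 : is_pyramid word
      = (match PySem.List.sorted (pvCount word.toList) (fun x => x) false with
         | [] => true
         | x :: xs => pvScanA x xs) := by
    unfold is_pyramid
    rw [if_neg hlen, halpha]
    exact if_neg (by simp)
  have hB0 : is_pyramid_alt word
      = (decide ((PySem.Set.ofList ((pvCount word.toList).filter (fun c => decide (c ≠ 0)))).length
            = ((pvCount word.toList).filter (fun c => decide (c ≠ 0))).length)
        && decide ((PySem.List.min? ((pvCount word.toList).filter (fun c => decide (c ≠ 0))) (fun x => x)).getD 0 = 1)
        && decide ((PySem.List.max? ((pvCount word.toList).filter (fun c => decide (c ≠ 0))) (fun x => x)).getD 0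
            = (((pvCount word.toList).filter (fun c => decide (c ≠ 0))).length : Int))) := by
    have hnestr : ¬ word = "" := fun h => hlen (by simp [h])
    unfold is_pyramid_alt
    rw [halpha, if_neg (by simp [hnestr])]
  generalize hcq : pvCount word.toList = cnt at *
  set nz := cnt.filter (fun v => decide (v ≠ 0)) with hnzdef
  have hD_iff : D_is_pyramid word ↔
      (cnt.Nodup ∧ (∀ c ∈ cnt, 2 ≤ c) ∧ (∀ c ∈ cnt, ∀ c' ∈ cnt, c - c' ≤ 25)) := by
    unfold D_is_pyramid
    rw [hbridge]
    exact ⟨fun h => ⟨h.2.2.1, h.2.2.2.1, h.2.2.2.2⟩, fun h => ⟨hne, halpha, h.1, h.2.1, h.2.2⟩⟩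
  have hnz_ne : nz ≠ [] := by
    intro hnil
    rw [hnzdef, List.filter_eq_nil_iff] at hnil
    have hz : cnt.sum = 0 := List.sum_eq_zero (by intro v hv; have := hnil v hv; simpa using this)
    rw [hz] at hcsum
    omega
  have hsperm : (PySem.List.sorted cnt (fun x => x) false).Perm cnt := PySem.List.sorted_perm ..
  have hspair : (PySem.List.sorted cnt (fun x => x) false).Pairwise (· ≤ ·) := by
    simpa using PySem.List.sorted_pairwise (xs := cnt) (key := fun x => x)
  obtain ⟨x, xs, hs⟩ : ∃ x xs, PySem.List.sorted cnt (fun x => x) false = x :: xs := by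
    cases hq : PySem.List.sorted cnt (fun x => x) false with
    | nil => exact absurd (hsperm.length_eq) (by rw [hq, hc26]; simp)
    | cons a b => exact ⟨a, b, rfl⟩
  rw [hs] at hsperm hspair
  have hA : is_pyramid word = pvScanA x xs := by rw [hA0, hs]
  have hslen : xs.length = 25 := by
    have := hsperm.length_eq
    rw [hc26] at this
    simpa using this
  have hxl : ((xs.length : Nat) : Int) = 25 := by rw [hslen]; norm_num
  have hsnn : ∀ v ∈ x :: xs, 0 ≤ v := fun v hv => hcnn v (hsperm.mem_iff.1 hv)
  have htperm : ((x :: xs).filter (fun v => decide (v ≠ 0))).Perm nz := by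
    rw [hnzdef]
    exact hsperm.filter _
  have htpair : ((x :: xs).filter (fun v => decide (v ≠ 0))).Pairwise (· ≤ ·) :=
    List.Pairwise.sublist List.filter_sublist hspair
  by_cases hx0 : x = 0
  · -- zeros present among the counts: D_ cannot hold and the two ports agree
    subst hx0
    have hnD : ¬ D_is_pyramid word := by
      intro hD
      have h0mem : (0 : Int) ∈ cnt := hsperm.mem_iff.1 (List.mem_cons_self ..)
      have := (hD_iff.1 hD).2.1 0 h0mem
      omega
    have hAB : is_pyramid word = is_pyramid_alt word := by
      rw [hA, hB0, pvScanA_zero xs hspair.of_cons (fun v hv => hsnn v (List.mem_cons_of_mem _ hv))]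
      have hfeq : List.filter (fun v => decide (v ≠ 0)) ((0:Int) :: xs)
          = List.filter (fun v => decide (v ≠ 0)) xs := by simp
      rw [hfeq] at htperm htpair
      obtain ⟨h, r, ht⟩ : ∃ h r, List.filter (fun v => decide (v ≠ 0)) xs = h :: r := by
        cases hq : List.filter (fun v => decide (v ≠ 0)) xs with
        | nil => rw [hq] at htperm; exact absurd htperm.symm.eq_nil hnz_ne
        | cons a b => exact ⟨a, b, rfl⟩
      rw [ht] at htperm htpair ⊢
      have hd : nz.length = r.length + 1 := by
        have := htperm.length_eq
        simpa using this.symm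
      have hmin : PySem.List.min? nz (fun x => x) = some h :=
        min_eq_head nz (h :: r) h r htperm rfl htpair
      rw [Bool.eq_iff_iff]
      simp only [isRun, Bool.and_eq_true, decide_eq_true_eq, hmin, Option.getD_some]
      constructor
      · rintro ⟨hh1, hrun⟩
        subst hh1
        obtain ⟨hnd, hlast⟩ := (isRun_iff r 1 htpair).1 hrun
        have hmax : PySem.List.max? nz (fun x => x) = some (1 + (r.length : Int)) :=
          max_eq_last nz ((1:Int) :: r) _ htperm hlast htpair
        refine ⟨⟨(ofList_len_eq_iff nz).2 (htperm.nodup_iff.1 hnd), by trivial⟩, ?_⟩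
        rw [hmax]
        simp only [Option.getD_some]
        rw [hd]
        push_cast
        ring
      · rintro ⟨⟨hlen26, hh1⟩, hmaxc⟩
        subst hh1
        have hnd : ((1:Int) :: r).Nodup := htperm.nodup_iff.2 ((ofList_len_eq_iff nz).1 hlen26)
        have hne' : ((1:Int) :: r) ≠ [] := by simp
        have hg : ((1:Int) :: r).getLast? = some (((1:Int) :: r).getLast hne') :=
          List.getLast?_eq_some_getLast hne'
        have hmax : PySem.List.max? nz (fun x => x) = some (((1:Int) :: r).getLast hne') :=
          max_eq_last nz ((1:Int) :: r) _ htperm hg htpair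
        rw [hmax] at hmaxc
        simp only [Option.getD_some] at hmaxc
        have hgval : ((1:Int) :: r).getLast hne' = 1 + (r.length : Int) := by
          rw [hd] at hmaxc
          push_cast at hmaxc ⊢
          omega
        exact ⟨by trivial, (isRun_iff r 1 htpair).2 ⟨hnd, by rw [hg, hgval]⟩⟩
    exact ⟨fun hD => absurd hD hnD, fun _ => hAB⟩
  · -- all 26 counts are nonzero
    have hx1 : (1:Int) ≤ x := by
      have := hsnn x (List.mem_cons_self ..)
      omega
    have hall : ∀ v ∈ x :: xs, v ≠ 0 := by
      intro v hv
      rcases List.mem_cons.1 hv with rfl | hv'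
      · omega
      · have := List.rel_of_pairwise_cons hspair hv'
        omega
    have hteq : List.filter (fun v => decide (v ≠ 0)) (x :: xs) = x :: xs :=
      List.filter_eq_self.2 (fun v hv => by simpa using hall v hv)
    rw [hteq] at htperm htpair
    have hd : ((nz.length : Nat) : Int) = 26 := by
      have := htperm.length_eq
      simp only [List.length_cons, hslen] at this
      omega
    have hmin : PySem.List.min? nz (fun x => x) = some x :=
      min_eq_head nz (x :: xs) x xs htperm rfl htpair
    have hScan : pvScanA x xs = isRun (x + 1) xs :=
      pvScanA_no_zero xs x (fun v hv => hall v (List.mem_cons_of_mem _ hv))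
    have hAiff : is_pyramid word = true ↔
        ((x :: xs).Nodup ∧ (x :: xs).getLast? = some (x + (xs.length : Int))) := by
      rw [hA, hScan]
      exact isRun_iff xs x hspair
    by_cases hxone : x = 1
    · -- minimum count 1: D_ cannot hold and the two ports agree
      subst hxone
      have hnD : ¬ D_is_pyramid word := by
        intro hD
        have h1mem : (1 : Int) ∈ cnt := hsperm.mem_iff.1 (List.mem_cons_self ..)
        have := (hD_iff.1 hD).2.1 1 h1mem
        omega
      have hAB : is_pyramid word = is_pyramid_alt word := by
        rw [Bool.eq_iff_iff, hAiff, hB0]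
        simp only [Bool.and_eq_true, decide_eq_true_eq, hmin, Option.getD_some]
        constructor
        · rintro ⟨hnd, hlast⟩
          have hmax : PySem.List.max? nz (fun x => x) = some (1 + (xs.length : Int)) :=
            max_eq_last nz ((1:Int) :: xs) _ htperm hlast htpair
          refine ⟨⟨(ofList_len_eq_iff nz).2 (htperm.nodup_iff.1 hnd), by trivial⟩, ?_⟩
          rw [hmax]
          simp only [Option.getD_some]
          omega
        · rintro ⟨⟨hlen26, -⟩, hmaxc⟩
          have hnd : ((1:Int) :: xs).Nodup := htperm.nodup_iff.2 ((ofList_len_eq_iff nz).1 hlen26)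
          have hne' : ((1:Int) :: xs) ≠ [] := by simp
          have hg : ((1:Int) :: xs).getLast? = some (((1:Int) :: xs).getLast hne') :=
            List.getLast?_eq_some_getLast hne'
          have hmax : PySem.List.max? nz (fun x => x) = some (((1:Int) :: xs).getLast hne') :=
            max_eq_last nz ((1:Int) :: xs) _ htperm hg htpair
          rw [hmax] at hmaxc
          simp only [Option.getD_some] at hmaxc
          have hgval : ((1:Int) :: xs).getLast hne' = 1 + (xs.length : Int) := by omega
          exact ⟨hnd, by rw [hg, hgval]⟩
      exact ⟨fun hD => absurd hD hnD, fun _ => hAB⟩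
    · -- minimum count at least 2: B is false; A is true exactly on D_
      have hx2 : (2:Int) ≤ x := by omega
      have hBf : is_pyramid_alt word = false := by
        rw [hB0]
        simp [hmin, hxone]
      refine ⟨?_, ?_⟩
      · intro hD
        obtain ⟨hnd, hge2, hspread⟩ := hD_iff.1 hD
        have hnd' : (x :: xs).Nodup := hsperm.nodup_iff.2 hnd
        have hne' : (x :: xs) ≠ [] := by simp
        have hg : (x :: xs).getLast? = some ((x :: xs).getLast hne') :=
          List.getLast?_eq_some_getLast hne'
        have hstrict : (x :: xs).Pairwise (· < ·) := by
          have := hspair.and hnd'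
          exact this.imp (fun {a b} ⟨h1, h2⟩ => lt_of_le_of_ne h1 h2)
        have hge := last_ge_of_pairwise_lt xs x ((x :: xs).getLast hne') hstrict hg
        have hgmem : (x :: xs).getLast hne' ∈ cnt :=
          hsperm.mem_iff.1 (List.mem_of_getLast? hg)
        have hxmem : x ∈ cnt := hsperm.mem_iff.1 (List.mem_cons_self ..)
        have hle := hspread _ hgmem x hxmem
        have hgval : (x :: xs).getLast hne' = x + (xs.length : Int) := by omega
        exact ⟨hAiff.2 ⟨hnd', by rw [hg, hgval]⟩, hBf⟩
      · intro hnD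
        rw [hBf]
        by_contra hAne
        have hAt : is_pyramid word = true := by
          cases hq : is_pyramid word with
          | false => exact absurd hq hAne
          | true => rfl
        obtain ⟨hnd', hlast⟩ := hAiff.1 hAt
        apply hnD
        apply hD_iff.2
        refine ⟨hsperm.nodup_iff.1 hnd', ?_, ?_⟩
        · intro c hc
          rcases List.mem_cons.1 (hsperm.mem_iff.2 hc) with rfl | hc'
          · omega
          · have := List.rel_of_pairwise_cons hspair hc'
            omega
        · intro c hc c' hc'
          have hcle : c ≤ x + (xs.length : Int) :=
            le_last_of_pairwise_le (x :: xs) (x + (xs.length : Int)) hspair hlast c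
              (hsperm.mem_iff.2 hc)
          have hc'ge : x ≤ c' := by
            rcases List.mem_cons.1 (hsperm.mem_iff.2 hc') with rfl | h
            · omega
            · exact List.rel_of_pairwise_cons hspair h
          omega

-- ===== VERDICT (by name: the statement is the Claim_ definition above) =====
theorem is_pyramid_spec : Claim_unchanged_is_pyramid := by
  intro word _hdom hpre
  unfold Spec_is_pyramid
  intro hnD
  by_cases hlen : word.toList.length = 0
  · simp [is_pyramid, is_pyramid_alt, hlen]
  · by_cases halpha : PySem.Str.strIsalpha word = true
    · have hchars : ∀ c ∈ word.toList, 71 ≤ c.toNat ∧ c.toNat ≤ 122 := by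
        have hall := hpre halpha
        rw [List.all_eq_true] at hall
        intro c hc
        have := hall c hc
        simpa using this
      exact (main_lemma word hlen halpha hchars).2 hnD
    · simp only [Bool.not_eq_true, PySem.Str.strIsalpha_eq] at halpha
      simp [is_pyramid, is_pyramid_alt, halpha]

set_option maxRecDepth 100000 in
theorem is_pyramid_changed : Claim_changed_is_pyramid := by
  unfold Claim_changed_is_pyramid
  decide

theorem is_pyramid_tight : Claim_exact_is_pyramid := by
  intro word _hdom hpre hD
  have hlen : ¬ word.toList.length = 0 := by
    intro h
    exact hD.1 (List.length_eq_zero_iff.1 h)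
  have halpha := hD.2.1
  have hchars : ∀ c ∈ word.toList, 71 ≤ c.toNat ∧ c.toNat ≤ 122 := by
    have hall := hpre halpha
    rw [List.all_eq_true] at hall
    intro c hc
    have := hall c hc
    simpa using this
  obtain ⟨hAt, hBf⟩ := (main_lemma word hlen halpha hchars).1 hD
  rw [hAt, hBf]
  simp
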